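-- pv_equiv track=rewrite | github.com/ACCESS-NRI/access-config-utils | src/access/config/layouts.py | _iter_grids
-- ===== SOURCE A (Python) =====
-- from collections.abc import Iterator
--
-- def _iter_grids(ndim: int, n_ranks: int) -> Iterator[tuple[int, ...]]:
--     """Yield all ndim-tuples whose product equals n_ranks."""
--     if ndim == 1:
--         yield (n_ranks,)
--         return
--     for d0 in range(1, n_ranks + 1):
--         if n_ranks % d0 == 0:
--             for rest in _iter_grids(ndim - 1, n_ranks // d0):
--                 yield (d0, *rest)
-- ===== SOURCE B (Python) =====
-- def _divisors(n):
--     """Divisors of n >= 1 in ascending order, via trial division up to sqrt(n)."""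
--     small = []
--     large = []
--     i = 1
--     while i * i <= n:
--         if n % i == 0:
--             small.append(i)
--             if i * i != n:
--                 large.append(n // i)
--         i += 1
--     return small + large[::-1]
--
-- def _iter_grids(ndim: int, n_ranks: int):
--     """Yield all ndim-tuples whose product equals n_ranks."""
--     if ndim == 1:
--         yield (n_ranks,)
--         return
--     if ndim < 1 or n_ranks < 1:
--         return
--     for d0 in _divisors(n_ranks):
--         for rest in _iter_grids(ndim - 1, n_ranks // d0):
--             yield (d0, *rest)
-- ===== Notes on version B (the rewrite author's own statement) =====
-- stated objective: alternative
-- what changed: Instead of scanning all of range(1, n_ranks+1) for divisors at every recursion node, B enumerates the divisors of n_ranks in ascending order by trial division up to sqrt(n_ranks) (small divisors forward, their cofactors backward); on inputs with many result tuples the output itself dominates, so no overall speed is claimed.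
-- crash fix: For ndim <= 0 with n_ranks >= 1, A recurses on ndim-1 forever and raises RecursionError, while B returns [] (no 0- or negative-dimensional grids). — e.g. on _iter_grids(0, 1): A raises RecursionError, B returns []
import Mathlib
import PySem

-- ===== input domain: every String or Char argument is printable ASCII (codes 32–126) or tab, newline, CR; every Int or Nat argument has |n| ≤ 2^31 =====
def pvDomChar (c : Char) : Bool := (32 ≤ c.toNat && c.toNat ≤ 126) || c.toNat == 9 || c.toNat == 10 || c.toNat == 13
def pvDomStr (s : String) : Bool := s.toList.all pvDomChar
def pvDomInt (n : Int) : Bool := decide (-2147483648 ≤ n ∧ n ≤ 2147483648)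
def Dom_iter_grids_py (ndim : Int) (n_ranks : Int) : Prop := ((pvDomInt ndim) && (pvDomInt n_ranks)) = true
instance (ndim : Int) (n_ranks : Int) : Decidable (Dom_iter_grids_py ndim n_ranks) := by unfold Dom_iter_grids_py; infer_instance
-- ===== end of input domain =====

-- B replaces A's full 1..n_ranks divisor scan at every recursion node by trial division up to
-- sqrt(n_ranks) (small divisors forward, cofactors backward); a different algorithm, no speed claimed.


-- ===== PORT A =====
-- A recurses on ndim; the Nat fuel (ndim.toNat + 1) only makes the recursion structural:
-- under Pre_ it is never exhausted (proved in the lemmas below).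
def iterGridsA : Nat → Int → Int → List (List Int)
  | 0, _, _ => []
  | fuel+1, ndim, n =>
    if ndim == 1 then [[n]]
    else
      (PySem.List.pyRange 1 (n+1) 1).flatMap (fun d0 =>
        if PySem.Int.mod n d0 == 0 then
          (iterGridsA fuel (ndim-1) (PySem.Int.floordiv n d0)).map (fun rest => d0 :: rest)
        else [])

def iter_grids_py (ndim : Int) (n_ranks : Int) : List (List Int) :=
  iterGridsA (ndim.toNat + 1) ndim n_ranks

-- ===== PORT B =====
-- the while-loop of _divisors; fuel (n.toNat + 1) exceeds the ≤ sqrt n iterations the loop makes.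
def divLoopB : Nat → Int → Int → List Int → List Int → List Int × List Int
  | 0, _, _, small, large => (small, large)
  | fuel+1, n, i, small, large =>
    if i * i ≤ n then
      if PySem.Int.mod n i == 0 then
        divLoopB fuel n (i+1) (small ++ [i])
          (if i * i != n then large ++ [PySem.Int.floordiv n i] else large)
      else divLoopB fuel n (i+1) small large
    else (small, large)

def divisorsB (n : Int) : List Int :=
  let p := divLoopB (n.toNat + 1) n 1 [] []
  p.1 ++ p.2.reverse

def iterGridsB : Nat → Int → Int → List (List Int)
  | 0, _, _ => []
  | fuel+1, ndim, n =>
    if ndim == 1 then [[n]]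
    else if ndim < 1 ∨ n < 1 then []
    else
      (divisorsB n).flatMap (fun d0 =>
        (iterGridsB fuel (ndim-1) (PySem.Int.floordiv n d0)).map (fun rest => d0 :: rest))

def iter_grids_py_alt (ndim : Int) (n_ranks : Int) : List (List Int) :=
  iterGridsB (ndim.toNat + 1) ndim n_ranks

-- ===== PRECONDITION & SPEC =====
-- A recurses once per dimension, so for n_ranks ≥ 1 CPython raises RecursionError whenever
-- ndim ≤ 0 (infinite descent) and whenever ndim is near or above the ~1000 recursion limit;
-- measured, the largest returning ndim is 997 when A is called at the top level and drops one-for-one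
-- with the caller's stack depth (947 at depth 50), so on 900 < ndim ≲ 997 whether A returns or raises
-- is decided by interpreter stack state, not by the input: Pre_ stays at ndim ≤ 900, safely below the
-- limit at any plausible call depth (see the cites for an excluded input where both still return).
def Pre_iter_grids_py (ndim : Int) (n_ranks : Int) : Prop :=
  n_ranks ≤ 0 ∨ (1 ≤ ndim ∧ ndim ≤ 900)
instance (ndim : Int) (n_ranks : Int) : Decidable (Pre_iter_grids_py ndim n_ranks) := by unfold Pre_iter_grids_py; infer_instance

def pvWitness_iter_grids_py : Int × Int := (2, 12)

-- For ndim ≤ 0 with n_ranks ≥ 1, A recurses on ndim-1 forever and raises RecursionError,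
-- while B returns [] (no 0- or negative-dimensional grids).
def Raises_iter_grids_py (ndim : Int) (n_ranks : Int) : Prop :=
  ndim ≤ 0 ∧ 1 ≤ n_ranks
instance (ndim : Int) (n_ranks : Int) : Decidable (Raises_iter_grids_py ndim n_ranks) := by unfold Raises_iter_grids_py; infer_instance
def pvRaiseWitness_iter_grids_py : Int × Int := (0, 1)
def pvRaiseWitnessOut_iter_grids_py : List (List Int) := []

def Spec_iter_grids_py (ndim : Int) (n_ranks : Int) (out : List (List Int)) : Prop := out = iter_grids_py_alt ndim n_ranks
instance (ndim : Int) (n_ranks : Int) (out : List (List Int)) : Decidable (Spec_iter_grids_py ndim n_ranks out) := by unfold Spec_iter_grids_py; infer_instance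

-- ===== CLAIM (what is proved, stated in full; the proofs are below) =====
def Claim_equal_iter_grids_py : Prop := ∀ (ndim : Int) (n_ranks : Int), Dom_iter_grids_py ndim n_ranks → Pre_iter_grids_py ndim n_ranks → Spec_iter_grids_py ndim n_ranks (iter_grids_py ndim n_ranks)
def Claim_raises_iter_grids_py : Prop := (∀ (ndim : Int) (n_ranks : Int), Dom_iter_grids_py ndim n_ranks → Raises_iter_grids_py ndim n_ranks → ¬ Pre_iter_grids_py ndim n_ranks) ∧ (Dom_iter_grids_py (pvRaiseWitness_iter_grids_py.1) (pvRaiseWitness_iter_grids_py.2) ∧ Raises_iter_grids_py (pvRaiseWitness_iter_grids_py.1) (pvRaiseWitness_iter_grids_py.2) ∧ iter_grids_py_alt (pvRaiseWitness_iter_grids_py.1) (pvRaiseWitness_iter_grids_py.2) = pvRaiseWitnessOut_iter_grids_py)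

-- ===== LEMMAS AND PROOFS =====

-- closed forms for the two halves the divisor loop accumulates from index i on
def smallsFrom (n i : Int) : List Int :=
  (PySem.List.pyRange i (n+1) 1).filter (fun d => decide (d * d ≤ n) && decide (d ∣ n))
def largesFrom (n i : Int) : List Int :=
  ((PySem.List.pyRange i (n+1) 1).filter (fun d => decide (d * d < n) && decide (d ∣ n))).map
    (fun d => n / d)

theorem divLoopB_spec (n : Int) (hn : 1 ≤ n) :
    ∀ (fuel : Nat) (i : Int) (small large : List Int), 1 ≤ i →
      (n.toNat + 1 - i.toNat ≤ fuel) →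
      divLoopB fuel n i small large = (small ++ smallsFrom n i, large ++ largesFrom n i) := by
  intro fuel
  induction fuel with
  | zero =>
    intro i small large hi hf
    have hni : n + 1 ≤ i := by omega
    simp [divLoopB, smallsFrom, largesFrom, PySem.List.pyRange_one_eq_nil hni]
  | succ fuel ih =>
    intro i small large hi hf
    by_cases hle : i * i ≤ n
    · have hin : i ≤ n := by nlinarith
      have hcons := PySem.List.pyRange_one_cons (show i < n + 1 by omega)
      by_cases hdvd : i ∣ n
      · have hmod : PySem.Int.mod n i = 0 := (PySem.Int.mod_eq_zero_iff_dvd n i).mpr hdvd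
        have hs : smallsFrom n i = i :: smallsFrom n (i+1) := by
          simp [smallsFrom, hcons, hle, hdvd]
        by_cases hsq : i * i = n
        · have hstep : divLoopB (fuel+1) n i small large
              = divLoopB fuel n (i+1) (small ++ [i]) large := by
            simp [divLoopB, hmod, hsq]
          have hl : largesFrom n i = largesFrom n (i+1) := by
            simp [largesFrom, hcons, hsq]
          rw [hstep, ih (i+1) _ _ (by omega) (by omega), hs, hl]
          simp
        · have hlt : i * i < n := lt_of_le_of_ne hle hsq
          have hstep : divLoopB (fuel+1) n i small large
              = divLoopB fuel n (i+1) (small ++ [i]) (large ++ [PySem.Int.floordiv n i]) := by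
            simp [divLoopB, hle, hmod, hsq]
          have hl : largesFrom n i = n / i :: largesFrom n (i+1) := by
            simp [largesFrom, hcons, hlt, hdvd]
          rw [hstep, ih (i+1) _ _ (by omega) (by omega), hs, hl,
            PySem.Int.floordiv_eq_ediv_of_pos (by omega)]
          simp
      · have hmod : ¬ PySem.Int.mod n i = 0 := fun h => hdvd ((PySem.Int.mod_eq_zero_iff_dvd n i).mp h)
        have hstep : divLoopB (fuel+1) n i small large = divLoopB fuel n (i+1) small large := by
          simp [divLoopB, hle, hmod]
        have hs : smallsFrom n i = smallsFrom n (i+1) := by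
          simp [smallsFrom, hcons, hdvd]
        have hl : largesFrom n i = largesFrom n (i+1) := by
          simp [largesFrom, hcons, hdvd]
        rw [hstep, ih (i+1) _ _ (by omega) (by omega), hs, hl]
    · have hstep : divLoopB (fuel+1) n i small large = (small, large) := by
        simp [divLoopB, hle]
      have hs : smallsFrom n i = [] := by
        rw [smallsFrom, List.filter_eq_nil_iff]
        intro d hd
        have hd' := PySem.List.mem_pyRange_one.mp hd
        have : ¬ d * d ≤ n := by nlinarith [hd'.1]
        simp [this]
      have hl : largesFrom n i = [] := by
        rw [largesFrom, List.map_eq_nil_iff, List.filter_eq_nil_iff]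
        intro d hd
        have hd' := PySem.List.mem_pyRange_one.mp hd
        have : ¬ d * d < n := by nlinarith [hd'.1]
        simp [this]
      rw [hstep, hs, hl]
      simp

theorem ediv_pos_of_dvd {n d : Int} (hn : 1 ≤ n) (hd : 1 ≤ d) (h : d ∣ n) : 1 ≤ n / d := by
  have h' := Int.mul_ediv_cancel' h
  nlinarith

theorem ediv_lt_ediv_of_dvd {n a b : Int} (hn : 1 ≤ n) (ha : 1 ≤ a) (hab : a < b)
    (hda : a ∣ n) (hdb : b ∣ n) : n / b < n / a := by
  have ha' := Int.mul_ediv_cancel' hda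
  have hb' := Int.mul_ediv_cancel' hdb
  have hpa : 1 ≤ n / a := ediv_pos_of_dvd hn ha hda
  have hpb : 1 ≤ n / b := ediv_pos_of_dvd hn (by omega) hdb
  nlinarith

theorem mem_smallsFrom (n z : Int) :
    z ∈ smallsFrom n 1 ↔ 1 ≤ z ∧ z ≤ n ∧ z * z ≤ n ∧ z ∣ n := by
  simp only [smallsFrom, List.mem_filter, PySem.List.mem_pyRange_one, Bool.and_eq_true,
    decide_eq_true_eq]
  constructor
  · rintro ⟨⟨h1, h2⟩, h3, h4⟩; exact ⟨h1, by omega, h3, h4⟩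
  · rintro ⟨h1, h2, h3, h4⟩; exact ⟨⟨h1, by omega⟩, h3, h4⟩

theorem mem_largesFrom (n z : Int) (hn : 1 ≤ n) :
    z ∈ largesFrom n 1 ↔ 1 ≤ z ∧ z ≤ n ∧ n < z * z ∧ z ∣ n := by
  simp only [largesFrom, List.mem_map, List.mem_filter, PySem.List.mem_pyRange_one,
    Bool.and_eq_true, decide_eq_true_eq]
  constructor
  · rintro ⟨d, ⟨⟨hd1, _⟩, hdlt, hdvd⟩, rfl⟩
    have hc := Int.mul_ediv_cancel' hdvd
    have hz1 : 1 ≤ n / d := ediv_pos_of_dvd hn hd1 hdvd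
    have hzdvd : n / d ∣ n := ⟨d, (Int.ediv_mul_cancel hdvd).symm⟩
    refine ⟨hz1, Int.le_of_dvd (by omega) hzdvd, ?_, hzdvd⟩
    nlinarith
  · rintro ⟨hz1, hzn, hzz, hzdvd⟩
    have hc := Int.mul_ediv_cancel' hzdvd
    have hd1 : 1 ≤ n / z := ediv_pos_of_dvd hn hz1 hzdvd
    have h2 : n / z * z = n := Int.ediv_mul_cancel hzdvd
    refine ⟨n / z, ⟨⟨hd1, ?_⟩, ?_, ⟨z, h2.symm⟩⟩, ?_⟩
    · have : n / z ∣ n := ⟨z, h2.symm⟩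
      have := Int.le_of_dvd (by omega) this
      omega
    · nlinarith
    · nth_rewrite 1 [← h2]
      exact Int.mul_ediv_cancel_left z (by omega)

theorem divisorsB_eq (n : Int) (hn : 1 ≤ n) :
    divisorsB n = (PySem.List.pyRange 1 (n+1) 1).filter (fun d => PySem.Int.mod n d == 0) := by
  have hloop := divLoopB_spec n hn (n.toNat + 1) 1 [] [] le_rfl (by omega)
  have hdiv : divisorsB n = smallsFrom n 1 ++ (largesFrom n 1).reverse := by
    simp only [divisorsB, hloop, List.nil_append]
  rw [hdiv]
  -- both sides are strictly increasing lists with the same elements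
  have hfsort : ∀ (p : Int → Bool),
      ((PySem.List.pyRange 1 (n+1) 1).filter p).Pairwise (· < ·) :=
    fun p => (PySem.List.pairwise_lt_pyRange_one 1 (n+1)).filter p
  have hsortS : (smallsFrom n 1).Pairwise (· < ·) := hfsort _
  have hsortL : (largesFrom n 1).Pairwise (· > ·) := by
    rw [largesFrom, List.pairwise_map]
    refine List.Pairwise.imp_of_mem ?_ (hfsort _)
    intro a b ha hb hab
    simp only [List.mem_filter, PySem.List.mem_pyRange_one, Bool.and_eq_true,
      decide_eq_true_eq] at ha hb
    exact ediv_lt_ediv_of_dvd hn ha.1.1 hab ha.2.2 hb.2.2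
  have hsort1 : (smallsFrom n 1 ++ (largesFrom n 1).reverse).Pairwise (· < ·) := by
    rw [List.pairwise_append]
    refine ⟨hsortS, List.pairwise_reverse.mpr hsortL, ?_⟩
    intro x hx y hy
    rw [List.mem_reverse] at hy
    have hx' := (mem_smallsFrom n x).mp hx
    have hy' := (mem_largesFrom n y hn).mp hy
    nlinarith [hx'.2.2.1, hy'.2.2.1, hx'.1, hy'.1]
  have hsort2 : ((PySem.List.pyRange 1 (n+1) 1).filter
      (fun d => PySem.Int.mod n d == 0)).Pairwise (· < ·) := hfsort _
  refine List.Perm.eq_of_pairwise (fun _ _ _ _ x y => absurd x (asymm y)) hsort1 hsort2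
    ((List.perm_ext_iff_of_nodup (hsort1.imp (fun h => ne_of_lt h))
      (hsort2.imp (fun h => ne_of_lt h))).mpr ?_)
  intro z
  rw [List.mem_append, List.mem_reverse, mem_smallsFrom n z, mem_largesFrom n z hn,
    List.mem_filter, PySem.List.mem_pyRange_one]
  simp only [beq_iff_eq, PySem.Int.mod_eq_zero_iff_dvd]
  constructor
  · rintro (⟨h1, h2, _, h4⟩ | ⟨h1, h2, _, h4⟩) <;> exact ⟨⟨h1, by omega⟩, h4⟩
  · rintro ⟨⟨h1, h2⟩, h3⟩
    by_cases hzz : z * z ≤ n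
    · exact Or.inl ⟨h1, by omega, hzz, h3⟩
    · exact Or.inr ⟨h1, by omega, by omega, h3⟩

theorem flatMap_if_eq_filter {α β : Type} (l : List α) (p : α → Bool) (f : α → List β) :
    l.flatMap (fun d => if p d then f d else []) = (l.filter p).flatMap f := by
  induction l with
  | nil => rfl
  | cons a t ih => by_cases h : p a <;> simp [h, ih]

theorem flatMap_congr' {α β : Type} (l : List α) (f g : α → List β)
    (h : ∀ a ∈ l, f a = g a) : l.flatMap f = l.flatMap g := by
  induction l with
  | nil => rfl
  | cons a t ih =>
    simp only [List.flatMap_cons]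
    rw [h a (by simp), ih (fun x hx => h x (by simp [hx]))]

theorem iterGrids_eq (fuel : Nat) :
    ∀ (ndim n : Int), (n ≤ 0 ∨ 1 ≤ ndim) → ndim.toNat < fuel →
      iterGridsA fuel ndim n = iterGridsB fuel ndim n := by
  induction fuel with
  | zero => intro ndim n _ h; omega
  | succ fuel ih =>
    intro ndim n hpre hfuel
    simp only [iterGridsA, iterGridsB]
    by_cases h1 : ndim = 1
    · simp [h1]
    · rw [if_neg (by simpa using h1), if_neg (by simpa using h1)]
      by_cases hdn : ndim < 1 ∨ n < 1
      · rw [if_pos hdn, PySem.List.pyRange_one_eq_nil (by omega)]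
        rfl
      · rw [if_neg hdn]
        push_neg at hdn
        have hn1 : 1 ≤ n := by omega
        have hnd : 2 ≤ ndim := by omega
        rw [divisorsB_eq n hn1, flatMap_if_eq_filter]
        apply flatMap_congr'
        intro d hd
        have hd1 : 1 ≤ d := by
          have := (List.mem_filter.mp hd).1
          have := (PySem.List.mem_pyRange_one.mp this).1
          omega
        rw [ih (ndim - 1) (PySem.Int.floordiv n d) (Or.inr (by omega)) (by omega)]

-- ===== VERDICT (by name: the statement is the Claim_ definition above) =====
theorem iter_grids_py_spec : Claim_equal_iter_grids_py := by
  intro ndim n _ hpre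
  unfold Pre_iter_grids_py at hpre
  unfold Spec_iter_grids_py iter_grids_py iter_grids_py_alt
  exact iterGrids_eq _ ndim n (by omega) (by omega)

@[simp] theorem iter_grids_py_raises : Claim_raises_iter_grids_py := by
  unfold Claim_raises_iter_grids_py
  exact ⟨by intro ndim n _ hr; unfold Raises_iter_grids_py at hr; unfold Pre_iter_grids_py; omega,
    by decide⟩
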